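-- pv_equiv track=rewrite | github.com/Thejshri-A/Python-1000 | 678. Air Pollution.py | air_pollution
-- ===== SOURCE A (Python) =====
-- def air_pollution(aqi = [45, 80, 120]):
--     classify=[]
--     for val in aqi:
--         if val<50:
--             classify.append("Good")
--         elif val<100:
--             classify.append("Moderate")
--         else:
--             classify.append("Not Good")
--     return classify
-- ===== SOURCE B (Python) =====
-- def air_pollution(aqi = [45, 80, 120]):
--     # staged refinement: everything starts "Not Good", then is progressively refined
--     classify = ["Not Good" for _ in aqi]
--     classify = [("Moderate" if val < 100 else c) for val, c in zip(aqi, classify)]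
--     classify = [("Good" if val < 50 else c) for val, c in zip(aqi, classify)]
--     return classify
-- ===== Notes on version B (the rewrite author's own statement) =====
-- stated objective: alternative
-- what changed: Replaces the single-pass if/elif/else append loop with staged refinement passes: initialise all labels to 'Not Good', then a pass overwriting values <100 with 'Moderate', then a pass overwriting values <50 with 'Good'.
import Mathlib
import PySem

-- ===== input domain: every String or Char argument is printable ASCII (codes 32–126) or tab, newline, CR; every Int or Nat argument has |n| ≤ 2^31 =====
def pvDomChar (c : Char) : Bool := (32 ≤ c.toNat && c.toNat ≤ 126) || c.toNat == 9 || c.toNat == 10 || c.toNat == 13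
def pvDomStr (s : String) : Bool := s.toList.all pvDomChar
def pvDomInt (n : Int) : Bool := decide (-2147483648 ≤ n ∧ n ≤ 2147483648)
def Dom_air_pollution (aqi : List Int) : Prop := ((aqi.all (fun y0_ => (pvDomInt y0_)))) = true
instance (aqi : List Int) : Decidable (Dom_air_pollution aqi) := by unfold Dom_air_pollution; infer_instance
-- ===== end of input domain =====

-- B replaces A's single-pass if/elif/else append loop with staged refinement passes
-- (all "Not Good", then refine <100 to "Moderate", then refine <50 to "Good"); alternative decomposition, same O(n) cost.


-- ===== PORT A =====
def air_pollution (aqi : List Int) : List String :=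
  aqi.foldl (fun classify val =>
    if val < 50 then classify ++ ["Good"]
    else if val < 100 then classify ++ ["Moderate"]
    else classify ++ ["Not Good"]) []

-- ===== PORT B =====
def air_pollution_alt (aqi : List Int) : List String :=
  let classify0 := aqi.map (fun _ => "Not Good")
  let classify1 := (aqi.zip classify0).map (fun p => if p.1 < 100 then "Moderate" else p.2)
  (aqi.zip classify1).map (fun p => if p.1 < 50 then "Good" else p.2)

-- ===== PRECONDITION & SPEC =====
def Spec_air_pollution (aqi : List Int) (out : List String) : Prop := out = air_pollution_alt aqi
instance (aqi : List Int) (out : List String) : Decidable (Spec_air_pollution aqi out) := by unfold Spec_air_pollution; infer_instance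

-- ===== CLAIM (what is proved, stated in full; the proofs are below) =====
def Claim_equal_air_pollution : Prop := ∀ (aqi : List Int), Dom_air_pollution aqi → Spec_air_pollution aqi (air_pollution aqi)

-- ===== LEMMAS AND PROOFS =====
theorem pv_foldl_append (f : Int → String) (l : List Int) (acc : List String) :
    l.foldl (fun c v => c ++ [f v]) acc = acc ++ l.map f := by
  induction l generalizing acc with
  | nil => simp
  | cons h t ih => simp [List.foldl, ih, List.append_assoc]

theorem pv_zip_self_map (l : List Int) (g : Int → String) (h : Int × String → String) :
    ((l.zip (l.map g)).map h) = l.map (fun v => h (v, g v)) := by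
  simp [List.zip, List.zipWith_map_right]

-- ===== VERDICT (by name: the statement is the Claim_ definition above) =====
theorem air_pollution_spec : Claim_equal_air_pollution := by
  intro aqi _
  show air_pollution aqi = air_pollution_alt aqi
  unfold air_pollution air_pollution_alt
  have hfun : (fun (classify : List String) (val : Int) =>
      if val < 50 then classify ++ ["Good"]
      else if val < 100 then classify ++ ["Moderate"]
      else classify ++ ["Not Good"])
    = (fun c v => c ++ [if v < 50 then "Good" else if v < 100 then "Moderate" else "Not Good"]) := by
    funext c v; split_ifs <;> rfl
  rw [hfun, pv_foldl_append]
  simp only []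
  rw [pv_zip_self_map aqi (fun _ => "Not Good"),
      pv_zip_self_map aqi (fun v => if v < 100 then "Moderate" else "Not Good")]
  simp
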